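-- pv_equiv track=rewrite | github.com/Bw3ll/sharem | sharemForMerge.py | reverseListLittleEndian
-- ===== SOURCE A (Python) =====
-- def reverseListLittleEndian(val):
-- 	val2=[]
-- 	for x in val:
-- 		x=x[::-1]
-- 		val2.append(x)
--
-- 	val2.reverse()
--
-- 	res=""
-- 	for each in val2:
-- 		res+=each
-- 	# print res
-- 	return res
-- ===== SOURCE B (Python) =====
-- def reverseListLittleEndian(val):
--     return "".join(val)[::-1]
-- ===== Notes on version B (the rewrite author's own statement) =====
-- stated objective: simpler
-- what changed: Replaces per-element string reversal plus list reversal plus a quadratic += concatenation loop with a single join of the elements in original order followed by one whole-string reversal, which is algebraically the same result.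
import Mathlib
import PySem

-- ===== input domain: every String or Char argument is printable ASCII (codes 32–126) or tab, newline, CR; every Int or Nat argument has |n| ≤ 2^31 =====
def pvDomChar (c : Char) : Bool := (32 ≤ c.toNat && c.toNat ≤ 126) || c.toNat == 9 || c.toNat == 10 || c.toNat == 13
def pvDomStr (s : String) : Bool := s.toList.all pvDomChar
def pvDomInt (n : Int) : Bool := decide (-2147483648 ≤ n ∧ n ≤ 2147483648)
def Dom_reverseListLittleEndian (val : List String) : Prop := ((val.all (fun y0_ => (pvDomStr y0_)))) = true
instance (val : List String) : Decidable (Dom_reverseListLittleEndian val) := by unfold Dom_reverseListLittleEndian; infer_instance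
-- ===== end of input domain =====

-- ===== PORT A =====
-- A: reverse each element (x[::-1]), reverse the list, then concatenate with res += each.
-- str concatenation 'res += each' is ported exactly as list-of-codepoints append via String.ofList/toList.
def reverseListLittleEndian (val : List String) : String :=
  let val2 : List String :=
    val.foldl (fun val2 x =>
      let x := (PySem.Str.slice? x none none (-1)).getD x  -- x[::-1]; step -1 is never an error
      val2 ++ [x]) []
  let val2 := val2.reverse
  val2.foldl (fun res each => String.ofList (res.toList ++ each.toList)) ""

-- ===== PORT B =====
-- B: ("".join(val))[::-1] — one join, one whole-string reversal.
def reverseListLittleEndian_alt (val : List String) : String :=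
  (PySem.Str.slice? (PySem.Str.join "" val) none none (-1)).getD ""  -- step -1 is never an error

-- ===== PRECONDITION & SPEC =====
def Spec_reverseListLittleEndian (val : List String) (out : String) : Prop := out = reverseListLittleEndian_alt val
instance (val : List String) (out : String) : Decidable (Spec_reverseListLittleEndian val out) := by unfold Spec_reverseListLittleEndian; infer_instance

-- ===== CLAIM (what is proved, stated in full; the proofs are below) =====
def Claim_equal_reverseListLittleEndian : Prop := ∀ (val : List String), Dom_reverseListLittleEndian val → Spec_reverseListLittleEndian val (reverseListLittleEndian val)

-- ===== LEMMAS AND PROOFS =====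

-- ===== VERDICT (by name: the statement is the Claim_ definition above) =====
-- concatenation loop: res accumulates the flatten of the pieces
lemma foldl_concat_toList (l : List String) (acc : String) :
    (l.foldl (fun res each => String.ofList (res.toList ++ each.toList)) acc).toList
      = acc.toList ++ (l.map String.toList).flatten := by
  induction l generalizing acc with
  | nil => simp
  | cons p ps ih => rw [List.foldl_cons, ih]; simp

-- "".join = flatten on the char-list side
lemma join_empty_sep (ps : List (List Char)) :
    PySem.Chars.join [] ps = ps.flatten := by
  induction ps with
  | nil => simp [PySem.Chars.join_nil]
  | cons p ps ih =>
    cases ps with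
    | nil => simp [PySem.Chars.join_singleton]
    | cons q rest => simpa [PySem.Chars.join_cons_cons] using ih

theorem reverseListLittleEndian_spec : Claim_equal_reverseListLittleEndian := by
  intro val _
  unfold Spec_reverseListLittleEndian reverseListLittleEndian reverseListLittleEndian_alt
  simp only [PySem.Str.slice?_none_none_neg_one, Option.getD_some,
    PySem.List.foldl_append_singleton_eq_map, List.nil_append]
  apply String.toList_inj.mp
  rw [foldl_concat_toList]
  simp only [String.toList_ofList, PySem.Str.toList_join, String.toList_empty,
    join_empty_sep, List.map_reverse, List.map_map]
  rw [List.reverse_flatten]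
  simp [Function.comp_def]
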